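-- pv_equiv track=rewrite | github.com/urntt/pylistall | src/pylistall/selection.py | flatten_patterns
-- ===== SOURCE A (Python) =====
-- from typing import Iterable, Optional, Sequence
--
-- def flatten_patterns(items: Sequence[str]) -> tuple[str, ...]:
--     """Flatten repeated and comma-separated patterns into a single tuple."""
--     patterns: list[str] = []
--     for item in items:
--         for part in item.split(","):
--             part = part.strip()
--             if part:
--                 patterns.append(part)
--     return tuple(patterns)
-- ===== SOURCE B (Python) =====
-- def flatten_patterns(items):
--     """Flatten repeated and comma-separated patterns into a single tuple.
--
--     Character-level state-machine tokenizer: no split()/strip() calls."""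
--     out = []
--     for item in items:
--         cur = ""   # current token, leading/trailing whitespace never enters it
--         pend = ""  # whitespace seen since the last token character
--         for ch in item:
--             if ch == ',':
--                 if cur:
--                     out.append(cur)
--                 cur = ""
--                 pend = ""
--             elif ch.isspace():
--                 if cur:
--                     pend += ch
--             else:
--                 cur += pend + ch
--                 pend = ""
--         if cur:
--             out.append(cur)
--     return tuple(out)
-- ===== Notes on version B (the rewrite author's own statement) =====
-- stated objective: alternative
-- what changed: Replaces A's split(',')-then-strip library pipeline with a hand-written single character-level state-machine tokenizer that maintains a current-token buffer and a pending-whitespace buffer, emitting tokens at commas and end of item.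
import Mathlib
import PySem

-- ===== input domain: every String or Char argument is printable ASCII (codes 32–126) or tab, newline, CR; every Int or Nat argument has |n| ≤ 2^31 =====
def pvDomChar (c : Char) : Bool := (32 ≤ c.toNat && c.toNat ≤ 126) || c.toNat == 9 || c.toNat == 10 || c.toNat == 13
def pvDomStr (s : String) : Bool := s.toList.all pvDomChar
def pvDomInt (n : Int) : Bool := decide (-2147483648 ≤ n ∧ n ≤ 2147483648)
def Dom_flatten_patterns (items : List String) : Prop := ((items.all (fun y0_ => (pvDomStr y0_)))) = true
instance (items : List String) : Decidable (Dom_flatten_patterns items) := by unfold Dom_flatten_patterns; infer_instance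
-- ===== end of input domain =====

-- B replaces A's split/strip library pipeline with a hand-written character-level state-machine
-- tokenizer (objective: alternative; same asymptotic cost).

-- shared primitive wrapper: s.split(sep) for sep ≠ "" (split? is some there)
def pySplit (s sep : String) : List String := (PySem.Str.split? s sep).getD []

-- ===== PORT A =====
def flatten_patterns (items : List String) : List String :=
  items.foldl (fun patterns item =>
    (pySplit item ",").foldl (fun patterns part =>
      let p := PySem.Str.strip part
      if p ≠ "" then patterns ++ [p] else patterns) patterns) []

-- ===== PORT B =====
-- inner character loop of Source B: out = tokens emitted, cur = current token, pend = pending whitespace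
def scanItem : List Char → List String → List Char → List Char → List String
  | [], out, cur, _ => if cur ≠ [] then out ++ [String.ofList cur] else out
  | c :: rest, out, cur, pend =>
    if c = ',' then
      scanItem rest (if cur ≠ [] then out ++ [String.ofList cur] else out) [] []
    else if PySem.Chars.isspace c then
      scanItem rest out cur (if cur ≠ [] then pend ++ [c] else pend)
    else
      scanItem rest out (cur ++ pend ++ [c]) []

def flatten_patterns_alt (items : List String) : List String :=
  items.foldl (fun out item => scanItem item.toList out [] []) []

-- ===== PRECONDITION & SPEC =====
def Spec_flatten_patterns (items : List String) (out : List String) : Prop := out = flatten_patterns_alt items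
instance (items : List String) (out : List String) : Decidable (Spec_flatten_patterns items out) := by unfold Spec_flatten_patterns; infer_instance

-- ===== CLAIM (what is proved, stated in full; the proofs are below) =====
def Claim_equal_flatten_patterns : Prop := ∀ (items : List String), Dom_flatten_patterns items → Spec_flatten_patterns items (flatten_patterns items)

-- ===== LEMMAS AND PROOFS =====

-- structural single-character splitter used to characterise Chars.splitOn s [c]
def splitC (c : Char) : List Char → List (List Char)
  | [] => [[]]
  | x :: rest =>
    if x = c then [] :: splitC c rest
    else match splitC c rest with
      | [] => [[x]]
      | h :: t => (x :: h) :: t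

def consHead (p : List Char) : List (List Char) → List (List Char)
  | [] => [p]
  | h :: t => (p ++ h) :: t

theorem splitC_ne_nil (c : Char) (s : List Char) : splitC c s ≠ [] := by
  cases s with
  | nil => simp [splitC]
  | cons x rest =>
    simp only [splitC]
    split
    · simp
    · split <;> simp

theorem consHead_nil_of_ne (ls : List (List Char)) (h : ls ≠ []) : consHead [] ls = ls := by
  cases ls with
  | nil => exact absurd rfl h
  | cons a t => simp [consHead]

theorem go_spec (c : Char) : ∀ (fuel : Nat) (l cur : List Char) (acc : List (List Char)),
    l.length ≤ fuel →
    PySem.Chars.splitOn.go [c] fuel l cur acc = acc.reverse ++ consHead cur.reverse (splitC c l) := by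
  intro fuel
  induction fuel with
  | zero =>
    intro l cur acc h
    have hl : l = [] := List.eq_nil_of_length_eq_zero (Nat.le_zero.mp h)
    subst hl
    simp [PySem.Chars.splitOn.go, splitC, consHead]
  | succ f ih =>
    intro l cur acc h
    cases l with
    | nil => simp [PySem.Chars.splitOn.go, splitC, consHead]
    | cons ch rest =>
      by_cases hc : ch = c
      · subst hc
        have hpre : List.isPrefixOf [ch] (ch :: rest) = true := by
          simp [List.isPrefixOf]
        rw [show PySem.Chars.splitOn.go [ch] (f+1) (ch :: rest) cur acc
              = PySem.Chars.splitOn.go [ch] f (List.drop 1 (ch :: rest)) [] (cur.reverse :: acc) by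
            simp [PySem.Chars.splitOn.go, hpre]]
        simp only [List.drop]
        rw [ih rest [] (cur.reverse :: acc) (by simpa using Nat.succ_le_succ_iff.mp h)]
        simp only [List.reverse_cons, List.reverse_nil]
        rw [consHead_nil_of_ne _ (splitC_ne_nil ch rest)]
        simp [splitC, consHead]
      · have hpre : List.isPrefixOf [c] (ch :: rest) = false := by
          simp [List.isPrefixOf]
          exact fun hh => absurd hh.symm hc
        rw [show PySem.Chars.splitOn.go [c] (f+1) (ch :: rest) cur acc
              = PySem.Chars.splitOn.go [c] f rest (ch :: cur) acc by
            simp [PySem.Chars.splitOn.go, hpre]]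
        rw [ih rest (ch :: cur) acc (Nat.succ_le_succ_iff.mp h)]
        simp only [List.reverse_cons]
        have hne := splitC_ne_nil c rest
        cases hrest : splitC c rest with
        | nil => exact absurd hrest hne
        | cons hd tl =>
          simp [splitC, hc, hrest, consHead]

theorem splitOn_single (c : Char) (s : List Char) :
    PySem.Chars.splitOn s [c] = splitC c s := by
  unfold PySem.Chars.splitOn
  rw [go_spec c (s.length + 1) s [] [] (Nat.le_succ _)]
  simp [consHead_nil_of_ne _ (splitC_ne_nil c s)]

theorem pySplit_comma (s : String) :
    pySplit s "," = (splitC ',' s.toList).map String.ofList := by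
  simp [pySplit, PySem.Str.split?, PySem.Chars.split?, splitOn_single]

-- inner loop of A: conditional append is map-then-filter
theorem foldl_strip_append (l : List String) (acc : List String) :
    l.foldl (fun acc part =>
      let p := PySem.Str.strip part
      if p ≠ "" then acc ++ [p] else acc) acc
    = acc ++ (l.map PySem.Str.strip).filter (fun p => p ≠ "") := by
  induction l generalizing acc with
  | nil => simp
  | cons x xs ih =>
    simp only [List.foldl_cons, List.map_cons, List.filter_cons]
    by_cases hx : PySem.Str.strip x ≠ ""
    · rw [ih]; simp [hx]
    · rw [ih]; simp at hx; simp [hx]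

theorem strip_ofList (cs : List Char) :
    PySem.Str.strip (String.ofList cs) = String.ofList (PySem.Chars.strip cs) := by
  simp [PySem.Str.strip]

-- the string-level strip/filter pipeline equals the char-level one
theorem map_strip_filter (L : List (List Char)) :
    ((L.map String.ofList).map PySem.Str.strip).filter (fun p => p ≠ "")
    = ((L.map PySem.Chars.strip).filter (fun p => p ≠ [])).map String.ofList := by
  induction L with
  | nil => simp
  | cons h t ih =>
    simp only [List.map_cons, strip_ofList]
    by_cases hh : PySem.Chars.strip h = []
    · rw [List.filter_cons_of_neg (by simp [hh]), List.filter_cons_of_neg (by simp [hh])]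
      exact ih
    · rw [List.filter_cons_of_pos (by simp [hh]),
          List.filter_cons_of_pos (by simp [hh]), List.map_cons, ih]

-- whitespace lemmas about Chars.strip
theorem rstrip_append_ws (x pend : List Char) (hp : pend.all PySem.Chars.isspace = true) :
    PySem.Chars.rstrip (x ++ pend) = PySem.Chars.rstrip x := by
  have hdrop : List.dropWhile PySem.Chars.isspace pend.reverse = [] := by
    rw [List.dropWhile_eq_nil_iff]
    intro a ha
    exact List.all_eq_true.mp hp a (List.mem_reverse.mp ha)
  simp [PySem.Chars.rstrip, List.reverse_append, List.dropWhile_append, hdrop]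

theorem lstrip_cons_ws (c : Char) (l : List Char) (hc : PySem.Chars.isspace c = true) :
    PySem.Chars.lstrip (c :: l) = PySem.Chars.lstrip l := by
  simp [PySem.Chars.lstrip, hc]

theorem strip_cons_ws (c : Char) (l : List Char) (hc : PySem.Chars.isspace c = true) :
    PySem.Chars.strip (c :: l) = PySem.Chars.strip l := by
  simp [PySem.Chars.strip, lstrip_cons_ws c l hc]

theorem lstrip_append_of_head (cur z : List Char)
    (hcur : cur ≠ []) (hl : PySem.Chars.lstrip cur = cur) :
    PySem.Chars.lstrip (cur ++ z) = cur ++ z := by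
  cases cur with
  | nil => exact absurd rfl hcur
  | cons a t =>
    have ha : PySem.Chars.isspace a = false := by
      by_contra h
      have ha' : PySem.Chars.isspace a = true := by
        cases h' : PySem.Chars.isspace a
        · exact absurd h' h
        · rfl
      have := hl
      simp [PySem.Chars.lstrip, ha'] at this
      have hlen := congrArg List.length this
      simp at hlen
      have := List.length_dropWhile_le PySem.Chars.isspace t
      omega
    simp [PySem.Chars.lstrip, ha]

theorem rstrip_append_of_last (z : List Char) (c : Char) (hc : PySem.Chars.isspace c = false) :
    PySem.Chars.rstrip (z ++ [c]) = z ++ [c] := by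
  simp [PySem.Chars.rstrip, List.reverse_append, hc]

-- flush value of the scanner state: strip (cur ++ pend) = cur under the loop invariants
theorem strip_state (cur pend : List Char)
    (hl : PySem.Chars.lstrip cur = cur) (hr : PySem.Chars.rstrip cur = cur)
    (hp : pend.all PySem.Chars.isspace = true) (hz : cur = [] → pend = []) :
    PySem.Chars.strip (cur ++ pend) = cur := by
  by_cases hcur : cur = []
  · subst hcur
    rw [hz rfl]
    rfl
  · unfold PySem.Chars.strip
    rw [lstrip_append_of_head cur pend hcur hl, rstrip_append_ws cur pend hp, hr]

-- the token list the scanner appends, as char-level split/strip/filter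
def scanTokens (cp : List Char) (segs : List (List Char)) : List String :=
  (((consHead cp segs).map PySem.Chars.strip).filter (fun p => p ≠ [])).map String.ofList

-- scanner correctness: one inner loop equals split-on-comma + strip + filter
theorem scanItem_spec (l : List Char) : ∀ (out : List String) (cur pend : List Char),
    PySem.Chars.lstrip cur = cur → PySem.Chars.rstrip cur = cur →
    pend.all PySem.Chars.isspace = true → (cur = [] → pend = []) →
    scanItem l out cur pend = out ++ scanTokens (cur ++ pend) (splitC ',' l) := by
  induction l with
  | nil =>
    intro out cur pend hl hr hp hz
    simp only [scanItem, scanTokens, splitC, consHead, List.append_nil, List.map_cons,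
      List.map_nil]
    rw [strip_state cur pend hl hr hp hz]
    by_cases hcur : cur = []
    · subst hcur
      rw [List.filter_cons_of_neg (by simp)]
      simp
    · rw [List.filter_cons_of_pos (by simp [hcur])]
      simp [hcur]
  | cons c rest ih =>
    intro out cur pend hl hr hp hz
    simp only [scanItem]
    by_cases hc : c = ','
    · subst hc
      rw [if_pos rfl, ih _ [] [] rfl rfl rfl (fun _ => rfl)]
      have hsp : splitC ',' (',' :: rest) = [] :: splitC ',' rest := by
        simp [splitC]
      rw [hsp]
      simp only [List.nil_append, scanTokens]
      rw [consHead_nil_of_ne _ (splitC_ne_nil ',' rest)]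
      simp only [consHead, List.append_nil, List.map_cons]
      rw [strip_state cur pend hl hr hp hz]
      by_cases hcur : cur = []
      · subst hcur
        rw [List.filter_cons_of_neg (by simp)]
        simp
      · rw [List.filter_cons_of_pos (by simp [hcur])]
        simp [hcur]
    · have hne := splitC_ne_nil ',' rest
      cases hrest : splitC ',' rest with
      | nil => exact absurd hrest hne
      | cons h t =>
        have hsp : splitC ',' (c :: rest) = (c :: h) :: t := by
          simp [splitC, hc, hrest]
        by_cases hws : PySem.Chars.isspace c = true
        · rw [if_neg hc, if_pos hws]
          by_cases hcur : cur = []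
          · have hpz := hz hcur
            subst hcur; subst hpz
            rw [if_neg (by simp)]
            rw [ih out [] [] rfl rfl rfl (fun _ => rfl)]
            rw [hrest, hsp]
            simp only [List.nil_append, scanTokens, consHead, List.map_cons]
            rw [strip_cons_ws c h hws]
          · rw [if_pos hcur]
            rw [ih out cur (pend ++ [c]) hl hr
                  (by simp [List.all_append, hp, hws]) (fun h' => absurd h' hcur)]
            rw [hrest, hsp]
            simp only [scanTokens, consHead]
            have hap : cur ++ (pend ++ [c]) ++ h = cur ++ pend ++ (c :: h) := by
              simp
            rw [hap]
        · have hws' : PySem.Chars.isspace c = false := by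
            cases h' : PySem.Chars.isspace c
            · rfl
            · exact absurd h' hws
          rw [if_neg hc, if_neg (by simp [hws'])]
          have hl' : PySem.Chars.lstrip (cur ++ pend ++ [c]) = cur ++ pend ++ [c] := by
            by_cases hcur : cur = []
            · have hpz := hz hcur
              subst hcur; subst hpz
              simp [PySem.Chars.lstrip, hws']
            · rw [List.append_assoc]
              exact lstrip_append_of_head cur (pend ++ [c]) hcur hl
          have hr' : PySem.Chars.rstrip (cur ++ pend ++ [c]) = cur ++ pend ++ [c] :=
            rstrip_append_of_last (cur ++ pend) c hws'
          rw [ih out (cur ++ pend ++ [c]) [] hl' hr' rfl (fun h' => rfl)]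
          rw [hrest, hsp]
          simp only [scanTokens, consHead, List.append_nil]
          have hap : cur ++ pend ++ [c] ++ h = cur ++ pend ++ (c :: h) := by
            simp
          rw [hap]

-- the two per-item steps agree
theorem step_eq (acc : List String) (item : String) :
    (pySplit item ",").foldl (fun patterns part =>
      let p := PySem.Str.strip part
      if p ≠ "" then patterns ++ [p] else patterns) acc
    = scanItem item.toList acc [] [] := by
  rw [foldl_strip_append, pySplit_comma, map_strip_filter]
  rw [scanItem_spec item.toList acc [] [] rfl rfl rfl (fun _ => rfl)]
  simp only [scanTokens, List.nil_append]
  rw [consHead_nil_of_ne _ (splitC_ne_nil ',' item.toList)]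

theorem foldl_eq (items : List String) : ∀ (acc : List String),
    items.foldl (fun patterns item =>
      (pySplit item ",").foldl (fun patterns part =>
        let p := PySem.Str.strip part
        if p ≠ "" then patterns ++ [p] else patterns) patterns) acc
    = items.foldl (fun out item => scanItem item.toList out [] []) acc := by
  induction items with
  | nil => intro acc; rfl
  | cons x xs ih =>
    intro acc
    simp only [List.foldl_cons]
    rw [step_eq, ih]

-- ===== VERDICT (by name: the statement is the Claim_ definition above) =====
theorem flatten_patterns_spec : Claim_equal_flatten_patterns := by
  intro items _
  unfold Spec_flatten_patterns flatten_patterns flatten_patterns_alt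
  exact foldl_eq items []
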